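-- pv_equiv track=rewrite | github.com/vuminhdiep/CSC483 | Project 3/ner.py | short_word_shape
-- ===== SOURCE A (Python) =====
-- def word_shape(word):
--     """Represent the abstract letter pattern of the word by mapping lower-case letters to 'x', upper-case to 'X', numbers to 'd', and retaining punctuation"""
--     new_word = ''
--     for char in word:
--         if char.isupper():
--             new_word += 'X'
--         elif char.islower():
--             new_word += 'x'
--         elif char.isdigit():
--             new_word += 'd'
--         else:
--             new_word += char
--     return new_word
--
-- def short_word_shape(word):
--     """Represent the abstract letter pattern of the word using shorter word shape features by removing duplicates"""
--     shape = word_shape(word)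
--     # Remove consecutive character types
--     new_word = ''
--     prev_type = None
--     for char in shape:
--         if char != prev_type:
--             new_word += char
--         prev_type = char
--     return new_word
-- ===== SOURCE B (Python) =====
-- def short_word_shape(word):
--     """Single pass: map each char to its shape class and emit it only when it
--     differs from the previously emitted shape char (fused map + collapse)."""
--     out = []
--     prev = None
--     for ch in word:
--         m = 'X' if ch.isupper() else 'x' if ch.islower() else 'd' if ch.isdigit() else ch
--         if m != prev:
--             out.append(m)
--             prev = m
--     return ''.join(out)
-- ===== Notes on version B (the rewrite author's own statement) =====
-- stated objective: simpler
-- what changed: B fuses A's two passes (build the full shape string, then a second scan collapsing consecutive duplicates) into one single pass that maps each character and appends it only when it differs from the last emitted shape character, with no intermediate shape string.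
import Mathlib
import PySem

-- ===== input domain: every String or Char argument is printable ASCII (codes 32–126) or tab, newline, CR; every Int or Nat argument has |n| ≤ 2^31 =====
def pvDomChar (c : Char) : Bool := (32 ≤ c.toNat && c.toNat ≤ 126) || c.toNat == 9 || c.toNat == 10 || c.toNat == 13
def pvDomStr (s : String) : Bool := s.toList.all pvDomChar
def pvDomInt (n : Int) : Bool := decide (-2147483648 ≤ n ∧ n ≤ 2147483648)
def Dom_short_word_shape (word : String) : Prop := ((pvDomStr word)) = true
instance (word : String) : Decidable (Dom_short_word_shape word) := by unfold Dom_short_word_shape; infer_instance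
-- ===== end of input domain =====

-- B fuses A's two passes into one: map each char to its shape class and append it
-- only when it differs from the last emitted shape char (objective: simpler).

-- ===== PORT A =====
-- word_shape: build the full shape string char by char (A's first loop)
def word_shape (word : String) : String :=
  String.ofList (word.toList.foldl (fun nw c =>
    if PySem.Chars.isupper c then nw ++ ['X']
    else if PySem.Chars.islower c then nw ++ ['x']
    else if PySem.Chars.isdigit c then nw ++ ['d']
    else nw ++ [c]) [])

-- second loop: collapse consecutive duplicates of the shape string
def short_word_shape (word : String) : String :=
  let shape := word_shape word
  let st := shape.toList.foldl (fun (p : List Char × Option Char) c =>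
    (if some c ≠ p.2 then p.1 ++ [c] else p.1, some c)) ([], none)
  String.ofList st.1

-- ===== PORT B =====
def short_word_shape_alt (word : String) : String :=
  let st := word.toList.foldl (fun (p : List Char × Option Char) ch =>
    let m := if PySem.Chars.isupper ch then 'X'
             else if PySem.Chars.islower ch then 'x'
             else if PySem.Chars.isdigit ch then 'd'
             else ch
    if some m ≠ p.2 then (p.1 ++ [m], some m) else p) ([], none)
  String.ofList st.1

-- ===== PRECONDITION & SPEC =====
def Spec_short_word_shape (word : String) (out : String) : Prop := out = short_word_shape_alt word
instance (word : String) (out : String) : Decidable (Spec_short_word_shape word out) := by unfold Spec_short_word_shape; infer_instance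

-- ===== CLAIM (what is proved, stated in full; the proofs are below) =====
def Claim_equal_short_word_shape : Prop := ∀ (word : String), Dom_short_word_shape word → Spec_short_word_shape word (short_word_shape word)

-- ===== LEMMAS AND PROOFS =====
def pvMapc (c : Char) : Char :=
  if PySem.Chars.isupper c then 'X'
  else if PySem.Chars.islower c then 'x'
  else if PySem.Chars.isdigit c then 'd'
  else c

theorem pv_shape_foldl (cs : List Char) (acc : List Char) :
    cs.foldl (fun nw c =>
      if PySem.Chars.isupper c then nw ++ ['X']
      else if PySem.Chars.islower c then nw ++ ['x']
      else if PySem.Chars.isdigit c then nw ++ ['d']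
      else nw ++ [c]) acc = acc ++ cs.map pvMapc := by
  induction cs generalizing acc with
  | nil => simp
  | cons c cs ih =>
      simp only [List.foldl_cons, List.map_cons, ih, pvMapc]
      split_ifs <;> simp

theorem pv_fuse (cs : List Char) (acc : List Char) (prev : Option Char) :
    (cs.map pvMapc).foldl (fun (p : List Char × Option Char) c =>
        (if some c ≠ p.2 then p.1 ++ [c] else p.1, some c)) (acc, prev)
    = cs.foldl (fun (p : List Char × Option Char) ch =>
        let m := pvMapc ch
        if some m ≠ p.2 then (p.1 ++ [m], some m) else p) (acc, prev) := by
  induction cs generalizing acc prev with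
  | nil => rfl
  | cons c cs ih =>
      simp only [List.map_cons, List.foldl_cons]
      split_ifs with h
      · exact ih _ _
      · have h' : some (pvMapc c) = prev := by simpa using h
        rw [← h']
        exact ih _ _

-- ===== VERDICT (by name: the statement is the Claim_ definition above) =====
theorem short_word_shape_spec : Claim_equal_short_word_shape := by
  intro word _
  show short_word_shape word = short_word_shape_alt word
  unfold short_word_shape short_word_shape_alt word_shape
  simp only [pv_shape_foldl, List.nil_append]
  rw [show (String.ofList (word.toList.map pvMapc)).toList = word.toList.map pvMapc by simp,
    pv_fuse]
  simp only [pvMapc]
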